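-- pv_equiv track=rewrite | github.com/JShistory/Algorithm- | 프로그래머스/lv2/72411. 메뉴 리뉴얼/메뉴 리뉴얼.py | solution
-- ===== SOURCE A (Python) =====
-- from itertools import combinations
-- from collections import Counter
--
-- def solution(orders, course):
--     answer = []
--     cooking = []
--     for i in course:
--         cooking = []
--         for j in orders:
--             for x in combinations(j,i):
--                 cook = "".join(sorted(x))
--                 cooking.append(cook)
--
--         sorted_cooking = Counter(cooking).most_common()
--         answer += [menu for menu,cnt in sorted_cooking if cnt>1 and cnt == sorted_cooking[0][1]]
-- #         for menu, cnt in sorted_cooking: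
-- #             if cnt > 1 and cnt == sorted_cooking[0][1]:
-- #                 answer.append(menu)
--
--     return sorted(answer)
-- ===== SOURCE B (Python) =====
-- from itertools import combinations
--
-- def solution(orders, course):
--     # No Counter/dict at all: per course size, sort the combo list once and do a
--     # single run-length scan over equal neighbours, tracking the best run length
--     # (must exceed 1) and every combo whose run ties it.
--     answer = []
--     for i in course:
--         combos = sorted("".join(sorted(x)) for j in orders for x in combinations(j, i))
--         best, winners, prev, cnt = 1, [], "", 0
--         for c in combos:
--             if cnt and c == prev:
--                 cnt += 1
--             else:
--                 if cnt > best: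
--                     best, winners = cnt, [prev]
--                 elif cnt == best and best > 1:
--                     winners.append(prev)
--                 prev, cnt = c, 1
--         if cnt > best:
--             winners = [prev]
--         elif cnt == best and best > 1:
--             winners.append(prev)
--         answer += winners
--     return sorted(answer)
-- ===== Notes on version B (the rewrite author's own statement) =====
-- stated objective: alternative
-- what changed: A counts combos per course size with a hash Counter and reads winners off most_common; B uses no dict at all: per course size it sorts the combo list once and a single run-length scan over equal neighbours tracks the best run length (>1) and the combos tying it.
import Mathlib
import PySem

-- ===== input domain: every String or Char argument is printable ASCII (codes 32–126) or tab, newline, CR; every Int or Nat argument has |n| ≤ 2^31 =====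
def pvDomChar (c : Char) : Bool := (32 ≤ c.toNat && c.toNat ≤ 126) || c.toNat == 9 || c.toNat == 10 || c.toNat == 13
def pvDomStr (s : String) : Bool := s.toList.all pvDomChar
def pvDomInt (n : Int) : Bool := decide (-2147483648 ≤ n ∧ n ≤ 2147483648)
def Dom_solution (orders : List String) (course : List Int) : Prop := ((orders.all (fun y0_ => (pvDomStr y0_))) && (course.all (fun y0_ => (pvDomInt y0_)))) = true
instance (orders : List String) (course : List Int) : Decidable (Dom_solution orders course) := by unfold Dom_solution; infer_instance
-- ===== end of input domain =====

-- B replaces A's hash counting (Counter + most_common) by sort-then-run-length-scan: per course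
-- size the combo list is sorted once and one linear scan over equal runs tracks the best run
-- length (>1) and its ties; objective: alternative algorithm (no speed claim).

-- ===== PORT A =====

-- "".join(sorted(x)) : joining a sorted list of chars is String.ofList of the sorted char list
def pvCook (x : List Char) : String := String.ofList (PySem.List.sorted x (fun c => c) false)

-- the inner two loops building `cooking` for one course size i
def pvCookingA (orders : List String) (i : Int) : List String :=
  orders.foldl (fun cooking j =>
    (PySem.List.combinations j.toList i.toNat).foldl
      (fun cooking x => cooking ++ [pvCook x]) cooking) []

-- Counter(cooking).most_common() and the comprehension; sorted_cooking[0] is only read while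
-- iterating a non-empty list, so it is its head (headD's default is never reached)
def pvContribA (orders : List String) (i : Int) : List String :=
  let sc := PySem.List.sorted (PySem.Dict.counter (pvCookingA orders i)).items (fun p => p.2) true
  (sc.filter (fun p => decide (1 < p.2) && decide (p.2 = (sc.headD ("", 0)).2))).map (fun p => p.1)

def solution (orders : List String) (course : List Int) : List String :=
  PySem.List.sorted
    (course.foldl (fun answer i => answer ++ pvContribA orders i) [])
    (fun x => x) false

-- ===== PORT B =====

-- combos = sorted("".join(sorted(x)) for j in orders for x in combinations(j, i))
def pvCombosB (orders : List String) (i : Int) : List String :=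
  PySem.List.sorted
    (orders.flatMap (fun j => (PySem.List.combinations j.toList i.toNat).map pvCook))
    (fun x => x) false

-- the loop body, over state (best, winners, prev, cnt); `if cnt and c == prev`
def pvScanStep (st : Int × List String × String × Int) (c : String) :
    Int × List String × String × Int :=
  let (best, winners, prev, cnt) := st
  if cnt != 0 && c == prev then (best, winners, prev, cnt + 1)
  else if best < cnt then (cnt, [prev], c, 1)
  else if cnt = best ∧ 1 < best then (best, winners ++ [prev], c, 1)
  else (best, winners, c, 1)

-- the trailing flush after the loop
def pvFlush (st : Int × List String × String × Int) : List String :=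
  let (best, winners, prev, cnt) := st
  if best < cnt then [prev]
  else if cnt = best ∧ 1 < best then winners ++ [prev]
  else winners

def pvContribB (orders : List String) (i : Int) : List String :=
  pvFlush ((pvCombosB orders i).foldl pvScanStep (1, [], "", 0))

def solution_alt (orders : List String) (course : List Int) : List String :=
  PySem.List.sorted
    (course.foldl (fun answer i => answer ++ pvContribB orders i) [])
    (fun x => x) false

-- ===== PRECONDITION & SPEC =====
-- Pre_ excludes exactly the inputs where Python A raises ValueError (B alike): a negative
-- course entry reaching itertools.combinations, i.e. any negative entry once orders is non-empty.
def Pre_solution (orders : List String) (course : List Int) : Prop := orders = [] ∨ ∀ i ∈ course, 0 ≤ i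
instance (orders : List String) (course : List Int) : Decidable (Pre_solution orders course) := by unfold Pre_solution; infer_instance
def pvWitness_solution : List String × List Int := (["abc", "ab"], [2])

def Spec_solution (orders : List String) (course : List Int) (out : List String) : Prop := out = solution_alt orders course
instance (orders : List String) (course : List Int) (out : List String) : Decidable (Spec_solution orders course out) := by unfold Spec_solution; infer_instance

-- ===== CLAIM (what is proved, stated in full; the proofs are below) =====
def Claim_equal_solution : Prop := ∀ (orders : List String) (course : List Int), Dom_solution orders course → Pre_solution orders course → Spec_solution orders course (solution orders course)

-- ===== LEMMAS AND PROOFS =====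

-- multiplicity of v in "p taken cnt times, plus l"
def pvCnt (p : String) (cnt : Int) (l : List String) (v : String) : Int :=
  (if v = p then cnt else 0) + (l.count v : Int)

-- running max of f over l starting from a
def pvFoldMax (f : String → Int) (a : Int) (l : List String) : Int :=
  l.foldl (fun x v => max x (f v)) a

-- the largest multiplicity (at least 1)
def pvM (p : String) (cnt : Int) (l : List String) : Int :=
  pvFoldMax (pvCnt p cnt l) 1 (PySem.List.dedup (p :: l))

theorem pvFoldMax_init_le (f : String → Int) (a : Int) (l : List String) :
    a ≤ pvFoldMax f a l := by
  induction l generalizing a with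
  | nil => exact le_refl a
  | cons x t ih => exact le_trans (le_max_left a (f x)) (ih (max a (f x)))

theorem pvFoldMax_max (f : String → Int) (a b : Int) (l : List String) :
    pvFoldMax f (max a b) l = max (pvFoldMax f a l) b := by
  induction l generalizing a with
  | nil => rfl
  | cons x t ih =>
    show pvFoldMax f (max (max a b) (f x)) t = _
    rw [show max (max a b) (f x) = max (max a (f x)) b by omega, ih]
    rfl

theorem le_pvFoldMax (f : String → Int) (a : Int) (l : List String) (x : String) (hx : x ∈ l) :
    f x ≤ pvFoldMax f a l := by
  induction l generalizing a with
  | nil => cases hx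
  | cons y t ih =>
    rcases List.mem_cons.mp hx with h | h
    · subst h
      exact le_trans (le_max_right a (f x)) (pvFoldMax_init_le f _ t)
    · exact ih _ h

theorem pvFoldMax_le (f : String → Int) (a b : Int) (l : List String)
    (h : ∀ x ∈ l, f x ≤ b) (ha : a ≤ b) : pvFoldMax f a l ≤ b := by
  induction l generalizing a with
  | nil => exact ha
  | cons x t ih =>
    exact ih _ (fun y hy => h y (List.mem_cons_of_mem _ hy))
      (max_le ha (h x (List.mem_cons_self ..)))

theorem pvFoldMax_congr (f g : String → Int) (a : Int) (l : List String)
    (h : ∀ x ∈ l, f x = g x) : pvFoldMax f a l = pvFoldMax g a l := by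
  induction l generalizing a with
  | nil => rfl
  | cons x t ih =>
    show pvFoldMax f (max a (f x)) t = pvFoldMax g (max a (g x)) t
    rw [h x (List.mem_cons_self ..), ih _ (fun y hy => h y (List.mem_cons_of_mem _ hy))]

theorem pvDedup_cons_cons (p : String) (t : List String) :
    PySem.List.dedup (p :: p :: t) = PySem.List.dedup (p :: t) := by
  simp [PySem.List.dedup, PySem.Set.ofList, PySem.Set.add, PySem.Set.empty]

theorem pvFoldl_add_cons (p : String) (l : List String) (hp : p ∉ l) (s : List String) :
    List.foldl PySem.Set.add (p :: s) l = p :: List.foldl PySem.Set.add s l := by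
  induction l generalizing s with
  | nil => rfl
  | cons x t ih =>
    have hxp : ¬ (p = x) := fun h => hp (h ▸ List.mem_cons_self ..)
    have hc : PySem.Set.contains (p :: s) x = PySem.Set.contains s x := by
      simp [PySem.Set.contains]
      intro h; exact absurd h.symm hxp
    have hstep : PySem.Set.add (p :: s) x = p :: PySem.Set.add s x := by
      simp only [PySem.Set.add, hc]
      split <;> rfl
    rw [List.foldl_cons, hstep, ih (fun h => hp (List.mem_cons_of_mem _ h)), List.foldl_cons]

theorem pvDedup_cons_not_mem (p : String) (l : List String) (hp : p ∉ l) :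
    PySem.List.dedup (p :: l) = p :: PySem.List.dedup l := by
  show List.foldl PySem.Set.add (PySem.Set.add PySem.Set.empty p) l = _
  have : PySem.Set.add PySem.Set.empty p = (p :: [] : List String) := rfl
  rw [this, pvFoldl_add_cons p l hp]
  rfl

theorem pvCnt_cons_self (p : String) (cnt : Int) (t : List String) (v : String) :
    pvCnt p cnt (p :: t) v = pvCnt p (cnt + 1) t v := by
  unfold pvCnt
  by_cases h : v = p
  · subst h
    rw [List.count_cons]
    simp
    omega
  · have : (p == v) = false := by simp; exact fun e => h e.symm
    rw [List.count_cons, this]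
    simp [h]

theorem pvCnt_of_ne (p c : String) (cnt : Int) (t : List String) (v : String) (hvp : v ≠ p) :
    pvCnt p cnt (c :: t) v = pvCnt c 1 t v := by
  unfold pvCnt
  by_cases h : v = c
  · subst h
    rw [List.count_cons]
    simp [hvp]
    omega
  · have : (c == v) = false := by simp; exact fun e => h e.symm
    rw [List.count_cons, this]
    simp [hvp, h]

theorem pvCnt_self_not_mem (p : String) (cnt : Int) (l : List String) (hp : p ∉ l) :
    pvCnt p cnt l p = cnt := by
  unfold pvCnt
  rw [List.count_eq_zero.mpr hp]
  simp

theorem pvM_cons_self (p : String) (cnt : Int) (t : List String) :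
    pvM p cnt (p :: t) = pvM p (cnt + 1) t := by
  unfold pvM
  rw [pvDedup_cons_cons]
  exact pvFoldMax_congr _ _ _ _ (fun v _ => pvCnt_cons_self p cnt t v)

theorem pvM_cons_ne (p c : String) (cnt : Int) (t : List String)
    (hp : p ∉ c :: t) :
    pvM p cnt (c :: t) = max (pvM c 1 t) cnt := by
  unfold pvM
  rw [pvDedup_cons_not_mem p (c :: t) hp]
  show pvFoldMax (pvCnt p cnt (c :: t)) (max 1 (pvCnt p cnt (c :: t) p)) (PySem.List.dedup (c :: t)) = _
  rw [pvCnt_self_not_mem p cnt (c :: t) hp]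
  rw [pvFoldMax_congr (pvCnt p cnt (c :: t)) (pvCnt c 1 t) _ _ (fun v hv => by
    have hv' : v ∈ c :: t := (PySem.List.mem_dedup (c :: t) v).mp hv
    exact pvCnt_of_ne p c cnt t v (fun e => hp (e ▸ hv')))]
  exact pvFoldMax_max (pvCnt c 1 t) 1 cnt (PySem.List.dedup (c :: t))

-- the run-length scan, fully characterised on a sorted remainder
theorem pv_scan_core (l : List String) (p : String) (cnt best : Int) (winners : List String)
    (hsort : l.Pairwise (· ≤ ·)) (hall : ∀ x ∈ l, p ≤ x) (hcnt : 1 ≤ cnt) (hbest : 1 ≤ best) :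
    pvFlush (l.foldl pvScanStep (best, winners, p, cnt)) =
      (if best < pvM p cnt l then [] else winners) ++
        (PySem.List.dedup (p :: l)).filter
          (fun v => decide (pvCnt p cnt l v = max best (pvM p cnt l)) &&
                    decide (1 < max best (pvM p cnt l))) := by
  induction l generalizing p cnt best winners with
  | nil =>
    have hM : pvM p cnt [] = cnt := by
      show max 1 (pvCnt p cnt [] p) = cnt
      simp [pvCnt]
      omega
    have hcp : pvCnt p cnt [] p = cnt := by simp [pvCnt]
    simp only [List.foldl_nil]
    rw [hM]
    show pvFlush (best, winners, p, cnt) = _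
    have hdd : PySem.List.dedup (p :: ([] : List String)) = [p] := rfl
    rw [hdd, List.filter_cons, List.filter_nil, hcp]
    by_cases h1 : best < cnt
    · have hcond : (decide (cnt = max best cnt) && decide (1 < max best cnt)) = true := by
        simp
        omega
      simp only [pvFlush, if_pos h1, hcond]
      simp
    · by_cases h2 : cnt = best ∧ 1 < best
      · have hcond : (decide (cnt = max best cnt) && decide (1 < max best cnt)) = true := by
          simp
          omega
        simp only [pvFlush, if_neg h1, if_pos h2, hcond]
        simp
      · have hcond : (decide (cnt = max best cnt) && decide (1 < max best cnt)) = false := by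
          rcases not_and_or.mp h2 with h3 | h3
          · simp
            intro hc
            omega
          · simp
            intro hc
            omega
        simp only [pvFlush, if_neg h1, if_neg h2, hcond]
        simp
  | cons c t ih =>
    have hsort' : t.Pairwise (· ≤ ·) := hsort.of_cons
    have hct : ∀ x ∈ t, c ≤ x := (List.pairwise_cons.mp hsort).1
    by_cases hc : c = p
    · subst hc
      have hstep : pvScanStep (best, winners, c, cnt) c = (best, winners, c, cnt + 1) := by
        have : (cnt != 0) = true := by simp; omega
        simp [pvScanStep, this]
      rw [List.foldl_cons, hstep,
        ih c (cnt + 1) best winners hsort'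
          (fun x hx => hall x (List.mem_cons_of_mem _ hx)) (by omega) hbest,
        pvM_cons_self, pvDedup_cons_cons]
      congr 1
      exact (List.filter_congr (fun v _ => by rw [pvCnt_cons_self c cnt t v])).symm
    · have hpc : p < c :=
        lt_of_le_of_ne (hall c (List.mem_cons_self ..)) (fun e => hc e.symm)
      have hpct : p ∉ c :: t := by
        intro hmem
        rcases List.mem_cons.mp hmem with e | hmem'
        · exact absurd e (ne_of_lt hpc)
        · exact absurd (hct p hmem') (not_le.mpr hpc)
      have hMrw : pvM p cnt (c :: t) = max (pvM c 1 t) cnt := pvM_cons_ne p c cnt t hpct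
      have hDrw : PySem.List.dedup (p :: c :: t) = p :: PySem.List.dedup (c :: t) :=
        pvDedup_cons_not_mem _ _ hpct
      have hcntp : pvCnt p cnt (c :: t) p = cnt := pvCnt_self_not_mem _ _ _ hpct
      have hbeq : (c == p) = false := by simp [hc]
      have hfcongr : ∀ B B' : Int, B = B' →
          (PySem.List.dedup (c :: t)).filter
              (fun v => decide (pvCnt p cnt (c :: t) v = B) && decide (1 < B))
            = (PySem.List.dedup (c :: t)).filter
              (fun v => decide (pvCnt c 1 t v = B') && decide (1 < B')) := by
        intro B B' hB
        subst hB
        refine List.filter_congr (fun v hv => ?_)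
        have hv' : v ∈ c :: t := (PySem.List.mem_dedup (c :: t) v).mp hv
        rw [pvCnt_of_ne p c cnt t v (fun e => hpct (e ▸ hv'))]
      rw [List.foldl_cons, hMrw, hDrw, List.filter_cons, hcntp]
      by_cases h1 : best < cnt
      · have hstep : pvScanStep (best, winners, p, cnt) c = (cnt, [p], c, 1) := by
          simp [pvScanStep, hbeq, h1]
        rw [hstep, ih c 1 cnt [p] hsort' hct (le_refl 1) (by omega)]
        have hB : max best (max (pvM c 1 t) cnt) = max cnt (pvM c 1 t) := by omega
        rw [hB, hfcongr _ _ rfl, if_pos (show best < max (pvM c 1 t) cnt by omega)]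
        by_cases hm : cnt < pvM c 1 t
        · have hcond : (decide (cnt = max cnt (pvM c 1 t)) &&
              decide (1 < max cnt (pvM c 1 t))) = false := by
            simp
            intro h
            omega
          rw [if_pos hm, hcond]
          simp
        · have hcond : (decide (cnt = max cnt (pvM c 1 t)) &&
              decide (1 < max cnt (pvM c 1 t))) = true := by
            simp
            omega
          rw [if_neg hm, hcond]
          simp
      · by_cases h2 : cnt = best ∧ 1 < best
        · have hstep : pvScanStep (best, winners, p, cnt) c = (best, winners ++ [p], c, 1) := by
            simp [pvScanStep, hbeq, h2]
          rw [hstep, ih c 1 best (winners ++ [p]) hsort' hct (le_refl 1) hbest]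
          have hB : max best (max (pvM c 1 t) cnt) = max best (pvM c 1 t) := by omega
          rw [hB, hfcongr _ _ rfl]
          by_cases hm : best < pvM c 1 t
          · have hcond : (decide (cnt = max best (pvM c 1 t)) &&
                decide (1 < max best (pvM c 1 t))) = false := by
              simp
              intro h
              omega
            rw [if_pos hm, if_pos (show best < max (pvM c 1 t) cnt by omega), hcond]
            simp
          · have hcond : (decide (cnt = max best (pvM c 1 t)) &&
                decide (1 < max best (pvM c 1 t))) = true := by
              simp
              omega
            rw [if_neg hm, if_neg (show ¬ best < max (pvM c 1 t) cnt by omega), hcond]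
            simp
        · have hstep : pvScanStep (best, winners, p, cnt) c = (best, winners, c, 1) := by
            simp [pvScanStep, hbeq, h1, h2]
          rw [hstep, ih c 1 best winners hsort' hct (le_refl 1) hbest]
          have hB : max best (max (pvM c 1 t) cnt) = max best (pvM c 1 t) := by omega
          rw [hB, hfcongr _ _ rfl]
          have hcond : (decide (cnt = max best (pvM c 1 t)) &&
              decide (1 < max best (pvM c 1 t))) = false := by
            rcases not_and_or.mp h2 with h3 | h3
            · simp
              intro h
              omega
            · simp
              intro h
              omega
          rw [hcond]
          by_cases hm : best < pvM c 1 t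
          · rw [if_pos hm, if_pos (show best < max (pvM c 1 t) cnt by omega)]
            simp
          · rw [if_neg hm, if_neg (show ¬ best < max (pvM c 1 t) cnt by omega)]
            simp
  

theorem pvCookingA_eq (orders : List String) (i : Int) :
    pvCookingA orders i
      = orders.flatMap (fun j => (PySem.List.combinations j.toList i.toNat).map pvCook) := by
  unfold pvCookingA
  simp only [PySem.List.foldl_append_singleton_eq_map]
  rw [PySem.List.foldl_append_eq_flatMap]
  simp

theorem pvCnt_eq_count (c : String) (t : List String) (v : String) :
    pvCnt c 1 t v = ((c :: t).count v : Int) := by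
  unfold pvCnt
  rw [List.count_cons]
  by_cases h : v = c
  · subst h
    simp
    omega
  · have : (c == v) = false := by simp; exact fun e => h e.symm
    rw [this]
    simp [h]

theorem pvContribB_char (orders : List String) (i : Int) (c : String) (t : List String)
    (hcase : pvCombosB orders i = c :: t) :
    pvContribB orders i
      = (PySem.List.dedup (c :: t)).filter
          (fun v => decide (pvCnt c 1 t v = max 1 (pvM c 1 t)) &&
                    decide (1 < max 1 (pvM c 1 t))) := by
  have hsorted : (pvCombosB orders i).Pairwise (· ≤ ·) :=
    PySem.List.sorted_pairwise _ (fun x => x)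
  rw [hcase] at hsorted
  have hstep : pvScanStep (1, [], "", 0) c = (1, [], c, 1) := by
    norm_num [pvScanStep]
  unfold pvContribB
  rw [hcase, List.foldl_cons, hstep,
    pv_scan_core t c 1 1 [] hsorted.of_cons (List.pairwise_cons.mp hsorted).1
      (le_refl 1) (le_refl 1)]
  simp

theorem pvContrib_perm (orders : List String) (i : Int) :
    (pvContribA orders i).Perm (pvContribB orders i) := by
  have hLG := pvCookingA_eq orders i
  have hSL : (pvCombosB orders i).Perm (pvCookingA orders i) := by
    rw [hLG]
    exact PySem.List.sorted_perm _ _ _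
  cases hcase : pvCombosB orders i with
  | nil =>
    have hLnil : pvCookingA orders i = [] := ((hcase ▸ hSL).symm).eq_nil
    have hA : pvContribA orders i = [] := by
      unfold pvContribA
      rw [hLnil]
      rfl
    have hB : pvContribB orders i = [] := by
      unfold pvContribB
      rw [hcase]
      norm_num [pvFlush]
    rw [hA, hB]
  | cons c t =>
    have hperm : (c :: t).Perm (pvCookingA orders i) := hcase ▸ hSL
    set L := pvCookingA orders i with hLdef
    -- the non-empty Counter side
    have hLne : L ≠ [] := fun h => by
      rw [h] at hperm
      exact absurd hperm.eq_nil (by simp)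
    have hitems : (PySem.Dict.counter L).items
        = (PySem.Set.ofList L).map (fun k => (k, (L.count k : Int))) :=
      PySem.Dict.items_counter L
    have hitne : (PySem.Dict.counter L).items ≠ [] := by
      rw [hitems]
      obtain ⟨x, hx⟩ := List.exists_mem_of_ne_nil L hLne
      have : x ∈ PySem.Set.ofList L := (PySem.Set.mem_ofList L x).mpr hx
      intro h
      rw [List.map_eq_nil_iff.mp h] at this
      cases this
    obtain ⟨hd, t', hsc⟩ :
        ∃ hd t', PySem.List.sorted (PySem.Dict.counter L).items (fun p => p.2) true = hd :: t' := by
      cases h : PySem.List.sorted (PySem.Dict.counter L).items (fun p => p.2) true with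
      | nil => exact absurd ((PySem.List.sorted_eq_nil_iff _ _ _).mp h) hitne
      | cons a b => exact ⟨a, b, rfl⟩
    have hhd_mem : hd ∈ (PySem.Dict.counter L).items :=
      (PySem.List.sorted_perm _ (fun p => p.2) true).mem_iff.mp (hsc ▸ List.mem_cons_self ..)
    obtain ⟨k, hk, hdg⟩ := List.mem_map.mp (hitems ▸ hhd_mem)
    have hk1 : hd.1 = k := by rw [← hdg]
    have hkL : k ∈ L := (PySem.Set.mem_ofList L k).mp hk
    have hm : hd.2 = (L.count k : Int) := by rw [← hdg]
    have hub : ∀ pr ∈ (PySem.Dict.counter L).items, pr.2 ≤ hd.2 :=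
      PySem.List.key_head_sorted_rev_ge (PySem.Dict.counter L).items
        (fun p : String × Int => p.2) hsc
    have hcub : ∀ v ∈ L, (L.count v : Int) ≤ hd.2 := fun v hv =>
      hub (v, (L.count v : Int))
        (hitems ▸ List.mem_map_of_mem ((PySem.Set.mem_ofList L v).mpr hv))
    have h1m : 1 ≤ hd.2 := by
      rw [hm]
      have : 0 < L.count k := List.count_pos_iff.mpr hkL
      omega
    -- counts in the sorted combo list are counts in L
    have hcnt : ∀ v, pvCnt c 1 t v = (L.count v : Int) := fun v => by
      rw [pvCnt_eq_count, hperm.count_eq v]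
    -- the scan's max is hd.2
    have hMle : pvM c 1 t ≤ hd.2 := by
      refine pvFoldMax_le _ _ _ _ (fun v hv => ?_) h1m
      have hv' : v ∈ c :: t := (PySem.List.mem_dedup _ v).mp hv
      rw [hcnt v]
      exact hcub v (hperm.mem_iff.mp hv')
    have hleM : hd.2 ≤ pvM c 1 t := by
      have hkS : k ∈ c :: t := hperm.mem_iff.mpr hkL
      have hkd : k ∈ PySem.List.dedup (c :: t) := (PySem.List.mem_dedup _ k).mpr hkS
      have := le_pvFoldMax (pvCnt c 1 t) 1 (PySem.List.dedup (c :: t)) k hkd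
      rw [hcnt k, ← hm] at this
      exact this
    have hMm : pvM c 1 t = hd.2 := le_antisymm hMle hleM
    have hmaxm : max 1 (pvM c 1 t) = hd.2 := by rw [hMm]; omega
    -- B in terms of counts in L
    have hB : pvContribB orders i
        = (PySem.List.dedup (c :: t)).filter
            (fun v => decide (1 < (L.count v : Int)) && decide ((L.count v : Int) = hd.2)) := by
      rw [pvContribB_char orders i c t hcase, hmaxm]
      refine List.filter_congr (fun v _ => ?_)
      rw [hcnt v]
      by_cases h : (L.count v : Int) = hd.2
      · simp [h, Bool.and_comm]
      · simp [h]
    -- A as a filtered map over the counter keys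
    have hA : (pvContribA orders i).Perm
        ((PySem.Set.ofList L).filter
          (fun v => decide (1 < (L.count v : Int)) && decide ((L.count v : Int) = hd.2))) := by
      show ((PySem.List.sorted (PySem.Dict.counter L).items (fun p => p.2) true).filter
          (fun p => decide (1 < p.2) &&
            decide (p.2 = ((PySem.List.sorted (PySem.Dict.counter L).items
              (fun p => p.2) true).headD ("", 0)).2))).map (fun p => p.1) |>.Perm _
      rw [hsc]
      have hflt : (((hd :: t') : List (String × Int)).filter
            (fun p => decide (1 < p.2) && decide (p.2 = ((hd :: t').headD ("", 0)).2))).Perm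
          ((PySem.Dict.counter L).items.filter
            (fun p : String × Int => decide (1 < p.2) && decide (p.2 = hd.2))) := by
        simp only [List.headD_cons]
        exact (hsc ▸ PySem.List.sorted_perm (PySem.Dict.counter L).items (fun p : String × Int => p.2) true).filter _
      refine (hflt.map _).trans ?_
      rw [hitems, List.filter_map, List.map_map]
      have : ((fun p => p.1) ∘ fun k => (k, (L.count k : Int))) = fun k : String => k := rfl
      rw [this, List.map_id']
      exact List.Perm.refl _
    -- the two key lists are permutations of each other
    have hkeys : (PySem.Set.ofList L).Perm (PySem.List.dedup (c :: t)) := by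
      rw [(List.perm_ext_iff_of_nodup (PySem.Set.nodup_ofList L)
        (PySem.List.nodup_dedup (c :: t)))]
      intro a
      rw [PySem.Set.mem_ofList, PySem.List.mem_dedup]
      exact (hperm.mem_iff).symm
    rw [hB]
    exact hA.trans (hkeys.filter _)

theorem pv_flatMap_perm {α β : Type} (l : List α) (f g : α → List β)
    (h : ∀ x ∈ l, (f x).Perm (g x)) : (l.flatMap f).Perm (l.flatMap g) := by
  induction l with
  | nil => rfl
  | cons x t ih =>
    simp only [List.flatMap_cons]
    exact (h x (List.mem_cons_self ..)).append (ih fun y hy => h y (List.mem_cons_of_mem _ hy))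

-- ===== VERDICT (by name: the statement is the Claim_ definition above) =====
theorem solution_spec : Claim_equal_solution := by
  intro orders course _ _
  unfold Spec_solution solution solution_alt
  rw [PySem.List.foldl_append_eq_flatMap, PySem.List.foldl_append_eq_flatMap]
  simp only [List.nil_append]
  exact PySem.List.sorted_eq_sorted_of_perm _ _ _ (fun a b h => h)
    (pv_flatMap_perm _ _ _ (fun i _ => pvContrib_perm orders i))
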